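-- pv_equiv track=rewrite | github.com/colabLearn/colabLearn.github.io | FitClusteringApp_2.3.py | compute_wikj
-- ===== SOURCE A (Python) =====
-- def compare_Xij_Xkj(xi, xk, in_tolerance):
--     outpList=[]
--     for xij, xkj, t in zip(xi, xk, in_tolerance):
--         temp = abs(xij - xkj)
--         if(temp<=t):
--             outpList.append(1)
--         else:
--             outpList.append(0)
--     return outpList
--
-- def compute_wikj(in_inputData_Dict, in_tolerance):
--     wikj_Dict ={}
--
--     for key1, value1 in in_inputData_Dict.items():
--         xij_xik={}
--         for key2, value2 in in_inputData_Dict.items():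
--             temp = compare_Xij_Xkj(value1, value2, in_tolerance)
--             xij_xik[key2]=temp
--
--         wikj_Dict[key1]= xij_xik
--
--     return wikj_Dict
-- ===== SOURCE B (Python) =====
-- def _compare(xi, xk, tol):
--     return [1 if abs(a - b) <= t else 0 for a, b, t in zip(xi, xk, tol)]
--
--
-- def compute_wikj(in_inputData_Dict, in_tolerance):
--     keys = list(in_inputData_Dict)
--     vals = list(in_inputData_Dict.values())
--     n = len(keys)
--     # abs(a - b) is symmetric, so compare each unordered pair of rows once
--     upper = [[_compare(vals[i], vals[k], in_tolerance) for k in range(i, n)]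
--              for i in range(n)]
--     return {keys[i]: {keys[k]: list(upper[min(i, k)][abs(i - k)])
--                       for k in range(n)}
--             for i in range(n)}
-- ===== Notes on version B (the rewrite author's own statement) =====
-- stated objective: alternative
-- what changed: Instead of two nested loops over the dict that compute every ordered pair's comparison vector, B computes only the upper triangle of vectors (each unordered pair once, exploiting symmetry of abs(xij-xkj)) and assembles the full matrix by reading cell (i,k) from upper[min(i,k)][abs(i-k)]; Pre_ excludes association lists with duplicate keys, which do not represent any Python dict input.
import Mathlib
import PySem

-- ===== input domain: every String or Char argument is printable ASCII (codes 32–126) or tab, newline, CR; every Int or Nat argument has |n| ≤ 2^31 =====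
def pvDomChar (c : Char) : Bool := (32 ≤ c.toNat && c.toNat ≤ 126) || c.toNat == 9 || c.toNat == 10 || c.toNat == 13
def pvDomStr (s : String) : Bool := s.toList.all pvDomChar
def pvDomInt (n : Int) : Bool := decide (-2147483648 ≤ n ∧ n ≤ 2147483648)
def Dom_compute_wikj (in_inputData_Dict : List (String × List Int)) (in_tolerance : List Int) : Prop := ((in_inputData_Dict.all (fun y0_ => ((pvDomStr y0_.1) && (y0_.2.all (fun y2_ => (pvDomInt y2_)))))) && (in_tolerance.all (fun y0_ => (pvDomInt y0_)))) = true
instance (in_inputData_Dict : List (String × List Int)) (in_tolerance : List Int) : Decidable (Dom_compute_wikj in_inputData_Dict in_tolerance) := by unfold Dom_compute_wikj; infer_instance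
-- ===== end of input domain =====

-- B replaces A's nested loops (every ordered pair compared) by computing the upper triangle of
-- comparison vectors once and reading cell (i,k) from upper[min(i,k)][abs(i-k)], exploiting the
-- symmetry of abs(xij-xkj); objective: alternative algorithm, same asymptotic cost.

-- ===== PORT A =====
-- compare_Xij_Xkj: loop over zip(xi, xk, in_tolerance) appending 1/0
def pvCmpA (xi xk tol : List Int) : List Int :=
  ((xi.zip xk).zip tol).foldl
    (fun acc p => acc ++ [if |p.1.1 - p.1.2| ≤ p.2 then (1 : Int) else 0]) []

def compute_wikj (in_inputData_Dict : List (String × List Int)) (in_tolerance : List Int) : List (String × List (String × List Int)) :=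
  (in_inputData_Dict.foldl
    (fun (w : PySem.Dict String (List (String × List Int))) p =>
      w.insert p.1
        ((in_inputData_Dict.foldl
          (fun (inner : PySem.Dict String (List Int)) q =>
            inner.insert q.1 (pvCmpA p.2 q.2 in_tolerance))
          PySem.Dict.empty).items))
    PySem.Dict.empty).items

-- ===== PORT B =====
-- _compare: comprehension over zip(xi, xk, tol)
def pvCmpB (xi xk tol : List Int) : List Int :=
  ((xi.zip xk).zip tol).map (fun p => if |p.1.1 - p.1.2| ≤ p.2 then (1 : Int) else 0)

def compute_wikj_alt (in_inputData_Dict : List (String × List Int)) (in_tolerance : List Int) : List (String × List (String × List Int)) :=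
  let keys := in_inputData_Dict.map Prod.fst
  let vals := in_inputData_Dict.map Prod.snd
  let n : Int := PySem.List.len keys
  let upper := (PySem.List.pyRange 0 n).map (fun i =>
      (PySem.List.pyRange i n).map (fun k =>
        pvCmpB (PySem.List.pyGetD vals i []) (PySem.List.pyGetD vals k []) in_tolerance))
  (PySem.Dict.ofList ((PySem.List.pyRange 0 n).map (fun i =>
    (PySem.List.pyGetD keys i "",
      (PySem.Dict.ofList ((PySem.List.pyRange 0 n).map (fun k =>
        (PySem.List.pyGetD keys k "",
          PySem.List.pyGetD (PySem.List.pyGetD upper (min i k) []) |i - k| [])))).items)))).items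

-- ===== PRECONDITION & SPEC =====
-- Pre_ excludes association lists with duplicate keys: they do not represent any Python dict
-- (A's parameter is a dict, so such inputs are unreachable for A and its overwrite order is accidental).
def Pre_compute_wikj (in_inputData_Dict : List (String × List Int)) (in_tolerance : List Int) : Prop :=
  (in_inputData_Dict.map Prod.fst).Nodup

instance (in_inputData_Dict : List (String × List Int)) (in_tolerance : List Int) : Decidable (Pre_compute_wikj in_inputData_Dict in_tolerance) := by unfold Pre_compute_wikj; infer_instance

def pvWitness_compute_wikj : (List (String × List Int)) × List Int :=
  ([("a", [0, 5]), ("b", [3, 4])], [1, 2])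

def Spec_compute_wikj (in_inputData_Dict : List (String × List Int)) (in_tolerance : List Int) (out : List (String × List (String × List Int))) : Prop := out = compute_wikj_alt in_inputData_Dict in_tolerance
instance (in_inputData_Dict : List (String × List Int)) (in_tolerance : List Int) (out : List (String × List (String × List Int))) : Decidable (Spec_compute_wikj in_inputData_Dict in_tolerance out) := by unfold Spec_compute_wikj; infer_instance

-- ===== CLAIM (what is proved, stated in full; the proofs are below) =====
def Claim_equal_compute_wikj : Prop := ∀ (in_inputData_Dict : List (String × List Int)) (in_tolerance : List Int), Dom_compute_wikj in_inputData_Dict in_tolerance → Pre_compute_wikj in_inputData_Dict in_tolerance → Spec_compute_wikj in_inputData_Dict in_tolerance (compute_wikj in_inputData_Dict in_tolerance)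

-- ===== LEMMAS AND PROOFS =====

-- A's appending loop computes the same list as B's comprehension
theorem pvCmpA_eq_pvCmpB (xi xk tol : List Int) : pvCmpA xi xk tol = pvCmpB xi xk tol := by
  unfold pvCmpA pvCmpB
  exact PySem.List.foldl_append_singleton_eq_map _ _ []

-- the comparison vector is symmetric in its two rows
theorem pvCmpB_symm (xi xk tol : List Int) : pvCmpB xi xk tol = pvCmpB xk xi tol := by
  induction xi generalizing xk tol with
  | nil => cases xk <;> simp [pvCmpB]
  | cons a as ih =>
    cases xk with
    | nil => simp [pvCmpB]
    | cons b bs =>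
      cases tol with
      | nil => simp [pvCmpB]
      | cons t ts =>
        have h := ih bs ts
        simp only [pvCmpB, List.zip_cons_cons, List.map_cons] at h ⊢
        rw [abs_sub_comm, h]

-- normal form of A under distinct keys: the full nested map
theorem compute_wikj_norm (d : List (String × List Int)) (tol : List Int)
    (h : (d.map Prod.fst).Nodup) :
    compute_wikj d tol =
      d.map (fun p => (p.1, d.map (fun q => (q.1, pvCmpB p.2 q.2 tol)))) := by
  unfold compute_wikj
  have inner : ∀ v : List Int,
      (d.foldl (fun (inner : PySem.Dict String (List Int)) q =>
          inner.insert q.1 (pvCmpA v q.2 tol)) PySem.Dict.empty).items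
        = d.map (fun q => (q.1, pvCmpB v q.2 tol)) := by
    intro v
    have := PySem.Dict.items_foldl_insert_fresh d Prod.fst
      (fun q => pvCmpA v q.2 tol) PySem.Dict.empty
      (fun a _ => PySem.Dict.contains_empty _) h
    simpa [pvCmpA_eq_pvCmpB] using this
  have outer := PySem.Dict.items_foldl_insert_fresh d Prod.fst
    (fun p => (d.foldl (fun (inner : PySem.Dict String (List Int)) q =>
        inner.insert q.1 (pvCmpA p.2 q.2 tol)) PySem.Dict.empty).items)
    PySem.Dict.empty
    (fun a _ => PySem.Dict.contains_empty _) h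
  simp only [outer]
  rw [show (PySem.Dict.empty : PySem.Dict String (List (String × List Int))).items = [] from rfl,
    List.nil_append]
  exact List.map_congr_left (fun p _ => by rw [inner p.2])

-- dict(comprehension) over pairwise-distinct keys lists exactly those pairs
theorem items_ofList_of_nodup {κ ν : Type} [BEq κ] [LawfulBEq κ] (l : List (κ × ν))
    (h : (l.map Prod.fst).Nodup) : (PySem.Dict.ofList l).items = l := by
  have := PySem.Dict.items_foldl_insert_fresh l Prod.fst Prod.snd PySem.Dict.empty
    (fun a _ => PySem.Dict.contains_empty _) h
  simpa using this

-- range(i, n) with unit step, as a map over List.range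
theorem pyRange_cast (i n : Nat) :
    PySem.List.pyRange (i : Int) (n : Int) = (List.range (n - i)).map (fun j => ((i + j : Nat) : Int)) := by
  rw [PySem.List.pyRange_of_pos _ _ one_pos]
  have hc : (if (i : Int) < (n : Int) then ((((n : Int) - i + 1 - 1)) / 1).toNat else 0) = n - i := by
    split_ifs with h
    · omega
    · omega
  rw [hc]
  exact List.map_congr_left (fun j _ => by push_cast; ring)

-- xs.getD on a mapped list, in-range
theorem getD_map_fst (d : List (String × List Int)) (i : Nat) (hi : i < d.length) (dflt : String) :
    (d.map Prod.fst).getD i dflt = (d[i]).1 := by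
  rw [List.getD_eq_getElem _ _ (by simpa using hi)]
  simp

theorem getD_map_snd (d : List (String × List Int)) (i : Nat) (hi : i < d.length) (dflt : List Int) :
    (d.map Prod.snd).getD i dflt = (d[i]).2 := by
  rw [List.getD_eq_getElem _ _ (by simpa using hi)]
  simp

-- the symmetric triangle lookup yields the full comparison vector
theorem upper_lookup (d : List (String × List Int)) (tol : List Int) (i k : Nat)
    (hi : i < d.length) (hk : k < d.length) :
    PySem.List.pyGetD
      (PySem.List.pyGetD
        ((List.range d.length).map (fun a : Nat =>
          (PySem.List.pyRange (a : Int) (d.length : Int)).map (fun b =>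
            pvCmpB (PySem.List.pyGetD (d.map Prod.snd) (a : Int) [])
                   (PySem.List.pyGetD (d.map Prod.snd) b []) tol)))
        (min (i : Int) (k : Int)) []) |(i : Int) - (k : Int)| []
      = pvCmpB (d[i]).2 (d[k]).2 tol := by
  have hmin : min (i : Int) (k : Int) = ((min i k : Nat) : Int) := by push_cast; rfl
  have habs : |(i : Int) - (k : Int)| = ((max i k - min i k : Nat) : Int) := by
    rcases le_total i k with h | h
    · rw [abs_of_nonpos (by omega)]; omega
    · rw [abs_of_nonneg (by omega)]; omega
  rw [hmin, habs]
  rw [PySem.List.pyGetD_natCast _ (min i k) []]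
  rw [PySem.List.getD_map_range _ _ _ _ (show min i k < d.length by omega)]
  rw [pyRange_cast (min i k) d.length, List.map_map]
  rw [PySem.List.pyGetD_natCast _ (max i k - min i k) []]
  rw [PySem.List.getD_map_range _ _ _ _ (show max i k - min i k < d.length - min i k by omega)]
  simp only [Function.comp_def]
  have hsum : min i k + (max i k - min i k) = max i k := by omega
  rw [hsum]
  rw [PySem.List.pyGetD_natCast, PySem.List.pyGetD_natCast,
    getD_map_snd d _ (by omega) [], getD_map_snd d _ (by omega) []]
  rcases le_total i k with h | h
  · simp only [min_eq_left h, max_eq_right h]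
  · simp only [min_eq_right h, max_eq_left h]; exact pvCmpB_symm _ _ _

-- normal form of B: the same nested map
theorem compute_wikj_alt_norm (d : List (String × List Int)) (tol : List Int)
    (h : (d.map Prod.fst).Nodup) :
    compute_wikj_alt d tol =
      d.map (fun p => (p.1, d.map (fun q => (q.1, pvCmpB p.2 q.2 tol)))) := by
  have hlen : PySem.List.len (d.map Prod.fst) = (d.length : Int) := by
    simp [PySem.List.len]
  have h0 : PySem.List.pyRange 0 (d.length : Int)
      = (List.range d.length).map (fun j => ((j : Nat) : Int)) := by
    have := pyRange_cast 0 d.length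
    simpa using this
  have hkeys : (List.range d.length).map
      (fun iN : Nat => PySem.List.pyGetD (d.map Prod.fst) (iN : Int) "") = d.map Prod.fst := by
    apply List.ext_getElem (by simp)
    intro idx h1 h2
    simp only [List.length_map] at h2
    simp [PySem.List.pyGetD_natCast, List.getElem?_eq_getElem h2]
  simp only [compute_wikj_alt, hlen, h0, List.map_map]
  rw [items_ofList_of_nodup _ (by rw [List.map_map]; exact (by simpa [Function.comp_def] using hkeys ▸ h : _))]
  apply List.ext_getElem (by simp)
  intro i h1 h2
  simp only [List.length_map, List.length_range] at h1
  simp only [List.length_map] at h2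
  rw [List.getElem_map, List.getElem_range, List.getElem_map]
  simp only [Function.comp_def]
  rw [items_ofList_of_nodup _ (by rw [List.map_map]; exact (by simpa [Function.comp_def] using hkeys ▸ h : _))]
  refine Prod.ext ?_ ?_
  · rw [PySem.List.pyGetD_natCast, getD_map_fst d i h1 ""]
  · dsimp only
    apply List.ext_getElem (by simp)
    intro k k1 k2
    simp only [List.length_map, List.length_range] at k1
    simp only [List.length_map] at k2
    rw [List.getElem_map, List.getElem_range, List.getElem_map]
    refine Prod.ext ?_ ?_
    · rw [PySem.List.pyGetD_natCast, getD_map_fst d k k1 ""]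
    · exact upper_lookup d tol i k h1 k1

-- ===== VERDICT (by name: the statement is the Claim_ definition above) =====
theorem compute_wikj_spec : Claim_equal_compute_wikj := by
  intro d tol _ hpre
  unfold Spec_compute_wikj
  rw [compute_wikj_norm d tol hpre, compute_wikj_alt_norm d tol hpre]
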